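-- pv_equiv track=rewrite | github.com/SarielMa/FinAI_data_202604 | freebsd_cvs_archive/parse_all_end_with_v.py | parse_cvs_text_block
-- ===== SOURCE A (Python) =====
-- def parse_cvs_text_block(s, start_idx):
--     i = start_idx
--     out = []
--
--     while i < len(s):
--         if s[i] == "@":
--             if i + 1 < len(s) and s[i + 1] == "@":
--                 out.append("@")
--                 i += 2
--             else:
--                 return "".join(out)
--         else:
--             out.append(s[i])
--             i += 1
--
--     return None
-- ===== SOURCE B (Python) =====
-- def parse_cvs_text_block(s, start_idx):
--     t = s[start_idx:]
--     # pass 1: find the first unescaped '@' (the '@' ending an odd-length run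
--     # of consecutive '@'s); everything before it is fully '@@'-paired.
--     term = -1
--     run = 0
--     for j in range(len(t)):
--         if t[j] == '@':
--             run += 1
--         else:
--             run = 0
--         if t[j] == '@' and run % 2 == 1 and (j + 1 == len(t) or t[j + 1] != '@'):
--             term = j
--             break
--     if term < 0:
--         return None
--     # pass 2: unescape in one sweep
--     return t[:term].replace('@@', '@')
-- ===== Notes on version B (the rewrite author's own statement) =====
-- stated objective: simpler
-- what changed: A copies characters one by one in a single Python-level loop that simultaneously decodes '@@' pairs and detects the terminator; B is two passes: a run-parity scan that only locates the first unescaped '@', then one slice plus a single str.replace('@@','@') to decode, moving the per-character copying into C-level primitives.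
-- outside the precondition, e.g. on parse_cvs_text_block('@a@', -1): A returns '@a', B returns ''
import Mathlib
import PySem

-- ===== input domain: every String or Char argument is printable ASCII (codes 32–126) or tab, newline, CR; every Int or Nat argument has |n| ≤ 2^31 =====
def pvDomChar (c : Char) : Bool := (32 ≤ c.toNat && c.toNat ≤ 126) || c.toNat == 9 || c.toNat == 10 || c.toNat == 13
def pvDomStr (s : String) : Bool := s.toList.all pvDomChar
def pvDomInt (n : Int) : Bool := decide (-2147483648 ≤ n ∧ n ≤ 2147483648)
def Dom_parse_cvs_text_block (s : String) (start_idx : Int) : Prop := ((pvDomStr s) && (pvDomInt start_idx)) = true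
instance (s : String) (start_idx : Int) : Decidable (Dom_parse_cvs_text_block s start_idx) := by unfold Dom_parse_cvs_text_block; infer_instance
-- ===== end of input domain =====

-- B replaces A's char-by-char copying loop by two passes: a run-parity scan that only
-- locates the terminating unescaped '@', then a single slice-and-replace ('@@' -> '@').
-- Objective: simpler decomposition; equivalence proved for 0 ≤ start_idx (see Pre_).

-- ===== PORT A =====
-- literal port of A's while-loop: Int index i, Python indexing via pyGet?
-- (pyGet? = none is Python's IndexError, reachable only for start_idx < -len(s), outside Pre_)
def pvA_loop (l : List Char) (out : List Char) (i : Int) : Option (List Char) :=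
  if i < (l.length : Int) then
    match PySem.List.pyGet? l i with
    | none => none
    | some c =>
      if c = '@' then
        if i + 1 < (l.length : Int) ∧ PySem.List.pyGet? l (i + 1) = some '@' then
          pvA_loop l (out ++ ['@']) (i + 2)
        else some out
      else pvA_loop l (out ++ [c]) (i + 1)
  else none
termination_by ((l.length : Int) - i).toNat
decreasing_by all_goals omega

def parse_cvs_text_block (s : String) (start_idx : Int) : Option String :=
  (pvA_loop s.toList [] start_idx).map String.ofList

-- ===== PORT B =====
-- pass 1 of Source B: for j in range(len(t)) with the run counter; the remaining suffix of t
-- stands for t[j:], so t[j] is its head and the lookahead t[j+1] is its second element.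
def pvB_find (u : List Char) (j : Nat) (run : Nat) : Option Nat :=
  match u with
  | [] => none
  | c :: rest =>
    let run' := if c = '@' then run + 1 else 0
    if c = '@' ∧ run' % 2 = 1 ∧ rest.head? ≠ some '@' then some j
    else pvB_find rest (j + 1) run'

def parse_cvs_text_block_alt (s : String) (start_idx : Int) : Option String :=
  let t := PySem.List.slice s.toList (some start_idx) none   -- t = s[start_idx:]
  match pvB_find t 0 0 with
  | none => none
  | some term => some (String.ofList (PySem.Chars.replace (t.take term) "@@".toList "@".toList))

-- ===== PRECONDITION & SPEC =====
-- Pre_ keeps the parser's natural domain: a non-negative resume position. For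
-- start_idx < -len(s) A raises IndexError; for -len(s) ≤ start_idx < 0 the value A
-- returns is an accident of Python's negative-index wraparound (it reads a suffix and
-- then keeps scanning from the front of the string), outside the function's purpose.
def Pre_parse_cvs_text_block (_s : String) (start_idx : Int) : Prop := 0 ≤ start_idx
instance (s : String) (start_idx : Int) : Decidable (Pre_parse_cvs_text_block s start_idx) := by
  unfold Pre_parse_cvs_text_block; infer_instance

def pvWitness_parse_cvs_text_block : String × Int := ("a@@b@c", 0)

def Spec_parse_cvs_text_block (s : String) (start_idx : Int) (out : Option String) : Prop :=
  out = parse_cvs_text_block_alt s start_idx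
instance (s : String) (start_idx : Int) (out : Option String) :
    Decidable (Spec_parse_cvs_text_block s start_idx out) := by
  unfold Spec_parse_cvs_text_block; infer_instance

-- ===== CLAIM =====
def Claim_equal_parse_cvs_text_block : Prop :=
  ∀ (s : String) (start_idx : Int), Dom_parse_cvs_text_block s start_idx →
    Pre_parse_cvs_text_block s start_idx →
    Spec_parse_cvs_text_block s start_idx (parse_cvs_text_block s start_idx)

-- ===== LEMMAS AND PROOFS =====

-- common specification: parse the block of a suffix, on the list level
def pvSpec : List Char → Option (List Char)
  | [] => none
  | '@' :: '@' :: r => (pvSpec r).map (fun w => '@' :: w)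
  | '@' :: _ => some []
  | c :: r => (pvSpec r).map (fun w => c :: w)

-- spec-level '@@' -> '@' replacement
def pvR : List Char → List Char
  | '@' :: '@' :: r => '@' :: pvR r
  | c :: r => c :: pvR r
  | [] => []

lemma pvR_cons_ne (c : Char) (r : List Char) (hc : c ≠ '@') : pvR (c :: r) = c :: pvR r := by
  cases r with
  | nil => simp [pvR]
  | cons d r' => simp [pvR, hc]

lemma pvSpec_cons_ne (c : Char) (r : List Char) (hc : c ≠ '@') :
    pvSpec (c :: r) = (pvSpec r).map (fun w => c :: w) := by
  cases r with
  | nil => simp [pvSpec]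
  | cons d r' => simp [pvSpec, hc]

lemma pvSpec_at_single (r : List Char) (h : r.head? ≠ some '@') :
    pvSpec ('@' :: r) = some [] := by
  cases r with
  | nil => simp [pvSpec]
  | cons d r' =>
    simp only [List.head?] at h
    rcases eq_or_ne d '@' with rfl | hd
    · simp at h
    · simp [pvSpec, hd]

lemma pvGo_nil (f : Nat) (acc : List Char) :
    PySem.Chars.replace.go ['@','@'] ['@'] f [] acc = acc.reverse := by
  cases f <;> simp [PySem.Chars.replace.go]

lemma pvGo_pair (f : Nat) (r acc : List Char) :
    PySem.Chars.replace.go ['@','@'] ['@'] (f + 1) ('@' :: '@' :: r) acc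
      = PySem.Chars.replace.go ['@','@'] ['@'] f r ('@' :: acc) := by
  simp [PySem.Chars.replace.go]

lemma pvGo_cons (f : Nat) (c : Char) (r acc : List Char)
    (hnp : ¬ List.isPrefixOf ['@','@'] (c :: r)) :
    PySem.Chars.replace.go ['@','@'] ['@'] (f + 1) (c :: r) acc
      = PySem.Chars.replace.go ['@','@'] ['@'] f r (c :: acc) := by
  simp [PySem.Chars.replace.go, hnp]

lemma pvGo_eq_pvR (f : Nat) (l acc : List Char) (hf : l.length ≤ f) :
    PySem.Chars.replace.go ['@','@'] ['@'] f l acc = acc.reverse ++ pvR l := by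
  induction f generalizing l acc with
  | zero =>
    have : l = [] := List.eq_nil_of_length_eq_zero (Nat.le_zero.mp hf)
    subst this; simp [pvGo_nil, pvR]
  | succ f ih =>
    match l with
    | [] => simp [pvGo_nil, pvR]
    | '@' :: '@' :: r =>
      rw [pvGo_pair]
      rw [ih r ('@' :: acc) (by simp at hf ⊢; omega)]
      simp [pvR]
    | '@' :: [] =>
      have hnp : ¬ List.isPrefixOf ['@','@'] ['@'] := by decide
      rw [pvGo_cons f '@' [] acc hnp, pvGo_nil]
      simp [pvR]
    | '@' :: c :: r =>
      rcases eq_or_ne c '@' with rfl | hc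
      · rw [pvGo_pair, ih r ('@' :: acc) (by simp at hf ⊢; omega)]; simp [pvR]
      · have hnp : ¬ List.isPrefixOf ['@','@'] ('@' :: c :: r) := by
          simp [List.isPrefixOf, Ne.symm hc]
        rw [pvGo_cons f '@' (c :: r) acc hnp]
        rw [ih (c :: r) ('@' :: acc) (by simp at hf ⊢; omega)]
        simp [pvR, hc]
    | c :: r =>
      -- c ≠ '@' is forced below when needed
      rcases eq_or_ne c '@' with rfl | hc
      · -- handled by the earlier branches; unreachable, but close it uniformly
        cases r with
        | nil =>
          have hnp : ¬ List.isPrefixOf ['@','@'] ['@'] := by decide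
          rw [pvGo_cons f '@' [] acc hnp, pvGo_nil]; simp [pvR]
        | cons d r' =>
          rcases eq_or_ne d '@' with rfl | hd
          · rw [pvGo_pair, ih r' ('@' :: acc) (by simp at hf ⊢; omega)]; simp [pvR]
          · have hnp : ¬ List.isPrefixOf ['@','@'] ('@' :: d :: r') := by
              simp [List.isPrefixOf, Ne.symm hd]
            rw [pvGo_cons f '@' (d :: r') acc hnp]
            rw [ih (d :: r') ('@' :: acc) (by simp at hf ⊢; omega)]
            simp [pvR, hd]
      · have hnp : ¬ List.isPrefixOf ['@','@'] (c :: r) := by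
          simp [List.isPrefixOf, Ne.symm hc]
        rw [pvGo_cons f c r acc hnp]
        rw [ih r (c :: acc) (by simp at hf ⊢; omega)]
        simp [pvR_cons_ne c r hc]

lemma pvReplace_eq_pvR (l : List Char) :
    PySem.Chars.replace l ['@','@'] ['@'] = pvR l := by
  have h : PySem.Chars.replace l ['@','@'] ['@']
      = PySem.Chars.replace.go ['@','@'] ['@'] l.length l [] := by
    simp [PySem.Chars.replace]
  rw [h, pvGo_eq_pvR l.length l [] le_rfl]; simp

-- reduction lemmas for B's scan
lemma pvB_find_cons_at (rest : List Char) (j run : Nat) :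
    pvB_find ('@' :: rest) j run
      = if (run + 1) % 2 = 1 ∧ rest.head? ≠ some '@' then some j
        else pvB_find rest (j + 1) (run + 1) := by
  simp [pvB_find]

lemma pvB_find_cons_ne (c : Char) (rest : List Char) (j run : Nat) (hc : c ≠ '@') :
    pvB_find (c :: rest) j run = pvB_find rest (j + 1) 0 := by
  simp [pvB_find, hc]

-- B's scan: the start index j only offsets the result
lemma pvB_find_shift (u : List Char) (j run : Nat) :
    pvB_find u j run = (pvB_find u 0 run).map (fun k => k + j) := by
  induction u generalizing j run with
  | nil => simp [pvB_find]
  | cons c rest ih =>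
    rcases eq_or_ne c '@' with rfl | hc
    · rw [pvB_find_cons_at, pvB_find_cons_at]
      by_cases hcond : ((run + 1) % 2 = 1 ∧ rest.head? ≠ some '@')
      · rw [if_pos hcond, if_pos hcond]; simp
      · rw [if_neg hcond, if_neg hcond, ih (j+1), ih 1, Option.map_map]
        congr 1; funext k; simp; omega
    · rw [pvB_find_cons_ne c rest j run hc, pvB_find_cons_ne c rest 0 run hc]
      rw [ih (j+1), ih 1, Option.map_map]
      congr 1; funext k; simp; omega

-- B's scan: only the parity of the run counter matters
lemma pvB_find_parity (u : List Char) (j r1 r2 : Nat) (h : r1 % 2 = r2 % 2) :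
    pvB_find u j r1 = pvB_find u j r2 := by
  induction u generalizing j r1 r2 with
  | nil => simp [pvB_find]
  | cons c rest ih =>
    rcases eq_or_ne c '@' with rfl | hc
    · have hp : (r1 + 1) % 2 = (r2 + 1) % 2 := by omega
      rw [pvB_find_cons_at, pvB_find_cons_at, hp, ih (j+1) (r1+1) (r2+1) hp]
    · rw [pvB_find_cons_ne c rest j r1 hc, pvB_find_cons_ne c rest j r2 hc]

-- pass 1 + pass 2 of B compute pvSpec
lemma pvB_eq_pvSpec (u : List Char) :
    (pvB_find u 0 0).map (fun term => pvR (u.take term)) = pvSpec u := by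
  induction u using pvSpec.induct with
  | case1 => simp [pvB_find, pvSpec]
  | case2 r ih =>
    have h1 : pvB_find ('@' :: '@' :: r) 0 0 = (pvB_find r 0 0).map (fun k => k + 2) := by
      rw [pvB_find_cons_at, if_neg (by simp), pvB_find_cons_at, if_neg (by simp)]
      rw [pvB_find_parity r 2 2 0 (by omega), pvB_find_shift r 2 0]
    rw [h1, Option.map_map]
    rw [show pvSpec ('@' :: '@' :: r) = (pvSpec r).map (fun w => '@' :: w) from by simp [pvSpec]]
    rw [← ih, Option.map_map]
    congr 1
  | case3 r hne =>
    -- '@' :: r with r not starting with '@'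
    have hh : r.head? ≠ some '@' := by
      cases r with
      | nil => simp
      | cons d r' =>
        simp only [List.head?, ne_eq, Option.some.injEq]
        intro hd; exact hne r' (by rw [hd])
    rw [pvB_find_cons_at, if_pos (by simp [hh]), pvSpec_at_single r hh]
    simp [pvR]
  | case4 c r hc1 hc2 ih =>
    have hc : c ≠ '@' := fun h => hc2 h
    have h1 : pvB_find (c :: r) 0 0 = (pvB_find r 0 0).map (fun k => k + 1) := by
      rw [pvB_find_cons_ne c r 0 0 hc, pvB_find_shift r 1 0]
    rw [h1, Option.map_map, pvSpec_cons_ne c r hc, ← ih, Option.map_map]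
    congr 1; funext k
    simp [Function.comp, pvR_cons_ne c _ hc]

-- A's loop computes pvSpec of the suffix, prefixed by the accumulator
lemma pvA_loop_eq_pvSpec (l : List Char) (out : List Char) (i : Int) (hi : 0 ≤ i) :
    pvA_loop l out i = (pvSpec (l.drop i.toNat)).map (fun w => out ++ w) := by
  refine pvA_loop.induct l
    (motive := fun out i => 0 ≤ i →
      pvA_loop l out i = (pvSpec (l.drop i.toNat)).map (fun w => out ++ w))
    ?_ ?_ ?_ ?_ ?_ out i hi
  · -- pyGet? = none: impossible for 0 ≤ i < len
    intro out i hlt hget hi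
    rw [PySem.List.pyGet?_eq_some_getElem l hi (by exact_mod_cast hlt)] at hget
    simp at hget
  · -- escaped pair
    intro out i hlt hpair hget ih hi
    have hstep : pvA_loop l out i = pvA_loop l (out ++ ['@']) (i + 2) := by
      rw [pvA_loop]
      simp only [if_pos hlt, hget, if_pos hpair, ite_true]
    obtain ⟨hlt2, hget2⟩ := hpair
    have hin : i.toNat < l.length := by omega
    have hin2 : i.toNat + 1 < l.length := by omega
    have hg1 : l[i.toNat] = '@' := by
      rw [PySem.List.pyGet?_eq_some_getElem l hi (by exact_mod_cast hlt)] at hget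
      exact Option.some.inj hget
    have hg2 : l[i.toNat + 1] = '@' := by
      rw [PySem.List.pyGet?_of_nonneg l (by omega)] at hget2
      rw [show (i + 1).toNat = i.toNat + 1 from by omega] at hget2
      exact (List.getElem?_eq_some_iff.mp hget2).2
    have hdrop : l.drop i.toNat = '@' :: '@' :: l.drop ((i + 2).toNat) := by
      rw [List.drop_eq_getElem_cons hin, List.drop_eq_getElem_cons hin2, hg1, hg2,
        show (i + 2).toNat = i.toNat + 2 from by omega]
    rw [hstep, ih (by omega), hdrop,
      show pvSpec ('@' :: '@' :: l.drop ((i + 2).toNat))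
        = (pvSpec (l.drop ((i + 2).toNat))).map (fun w => '@' :: w) from by simp [pvSpec],
      Option.map_map]
    congr 1
    funext w
    simp
  · -- terminator: '@' with no '@' after it
    intro out i hlt hpair hget hi
    have hstep : pvA_loop l out i = some out := by
      rw [pvA_loop]
      simp only [if_pos hlt, hget, if_neg hpair, ite_true]
    have hin : i.toNat < l.length := by omega
    have hg1 : l[i.toNat] = '@' := by
      rw [PySem.List.pyGet?_eq_some_getElem l hi (by exact_mod_cast hlt)] at hget
      exact Option.some.inj hget
    have hdrop : l.drop i.toNat = '@' :: l.drop (i.toNat + 1) := by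
      rw [List.drop_eq_getElem_cons hin, hg1]
    have hh : (l.drop (i.toNat + 1)).head? ≠ some '@' := by
      intro hcon
      apply hpair
      have hlen : i.toNat + 1 < l.length := by
        by_contra hge
        rw [List.drop_eq_nil_of_le (by omega)] at hcon
        simp at hcon
      refine ⟨by exact_mod_cast (by omega : (i + 1 : Int) < (l.length : Int)), ?_⟩
      rw [List.drop_eq_getElem_cons hlen] at hcon
      simp only [List.head?, Option.some.injEq] at hcon
      rw [PySem.List.pyGet?_of_nonneg l (by omega),
        show (i + 1).toNat = i.toNat + 1 from by omega,
        List.getElem?_eq_getElem hlen, hcon]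
    rw [hstep, hdrop, pvSpec_at_single _ hh]
    simp
  · -- ordinary character
    intro out i hlt c hget hc ih hi
    have hstep : pvA_loop l out i = pvA_loop l (out ++ [c]) (i + 1) := by
      rw [pvA_loop]
      simp only [if_pos hlt, hget, if_neg hc]
    have hin : i.toNat < l.length := by omega
    have hg1 : l[i.toNat] = c := by
      rw [PySem.List.pyGet?_eq_some_getElem l hi (by exact_mod_cast hlt)] at hget
      exact Option.some.inj hget
    have hdrop : l.drop i.toNat = c :: l.drop ((i + 1).toNat) := by
      rw [List.drop_eq_getElem_cons hin, hg1,
        show (i + 1).toNat = i.toNat + 1 from by omega]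
    rw [hstep, ih (by omega), hdrop, pvSpec_cons_ne c _ hc, Option.map_map]
    congr 1
    funext w
    simp
  · -- i ≥ len: both sides none
    intro out i hge hi
    rw [pvA_loop, if_neg hge, List.drop_eq_nil_of_le (by omega)]
    simp [pvSpec]

-- ===== VERDICT =====
theorem parse_cvs_text_block_spec : Claim_equal_parse_cvs_text_block := by
  intro s start_idx _hDom hPre
  unfold Spec_parse_cvs_text_block
  unfold parse_cvs_text_block parse_cvs_text_block_alt
  have hPre' : (0:Int) ≤ start_idx := hPre
  rw [PySem.List.slice_from _ hPre']
  rw [pvA_loop_eq_pvSpec s.toList [] start_idx hPre']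
  rw [← pvB_eq_pvSpec (s.toList.drop start_idx.toNat)]
  rcases hB : pvB_find (s.toList.drop start_idx.toNat) 0 0 with _ | term
  · simp [hB]
  · simp [hB, pvReplace_eq_pvR]
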